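-- pv_equiv track=rewrite | github.com/mikana30/Threat_Intel_Tools | collect_recon.py | choose_http_signal
-- ===== SOURCE A (Python) =====
-- from typing import Dict, Iterable, List, Tuple
--
-- def choose_http_signal(entries: Iterable[dict] | None) -> Tuple[str, str]:
--     if not entries:
--         return "", ""
--
--     best_item = None
--     best_score = (-1, 0)
--     for idx, item in enumerate(entries):
--         status_str = item.get("status")
--         try:
--             status = int(status_str)
--         except (TypeError, ValueError):
--             status = 0
--
--         if status == 200:
--             tier = 3
--         elif 100 <= status < 400:
--             tier = 2
--         elif status > 0:
--             tier = 1
--         else: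
--             tier = 0
--
--         score = (tier, -idx)
--         if score > best_score:
--             best_score = score
--             best_item = item
--
--     if not best_item:
--         return "", ""
--
--     status = best_item.get("status") or ""
--     server = best_item.get("server") or ""
--     return str(status), server
-- ===== SOURCE B (Python) =====
-- def _tier(value):
--     try:
--         status = int(value)
--     except (TypeError, ValueError):
--         status = 0
--     if status == 200:
--         return 3
--     if 100 <= status < 400:
--         return 2
--     if status > 0:
--         return 1
--     return 0
--
--
-- def choose_http_signal(entries):
--     if not entries:
--         return "", ""
--     items = list(entries)
--     best = max(_tier(i.get("status")) for i in items)
--     item = next(i for i in items if _tier(i.get("status")) == best)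
--     return str(item.get("status") or ""), item.get("server") or ""
-- ===== Notes on version B (the rewrite author's own statement) =====
-- stated objective: idiomatic
-- what changed: Replaces the single-pass (tier,-idx) lexicographic-score tracking fold (and the redundant falsy-best_item recheck) by a two-pass max-then-first-match: compute the maximum tier with max(), then pick the first item achieving it with next().
import Mathlib
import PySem

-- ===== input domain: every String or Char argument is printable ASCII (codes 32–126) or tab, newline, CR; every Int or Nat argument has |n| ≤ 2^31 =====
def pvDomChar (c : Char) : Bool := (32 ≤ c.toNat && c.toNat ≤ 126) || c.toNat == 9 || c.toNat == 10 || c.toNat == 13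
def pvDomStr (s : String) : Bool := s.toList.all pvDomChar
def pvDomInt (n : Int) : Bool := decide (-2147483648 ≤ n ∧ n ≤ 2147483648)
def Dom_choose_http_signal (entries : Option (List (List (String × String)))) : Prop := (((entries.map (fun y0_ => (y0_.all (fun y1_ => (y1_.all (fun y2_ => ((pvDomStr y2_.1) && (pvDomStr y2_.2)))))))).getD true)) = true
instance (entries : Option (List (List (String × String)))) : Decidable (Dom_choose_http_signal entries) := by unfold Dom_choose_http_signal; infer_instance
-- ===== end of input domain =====

-- B replaces A's single-pass lexicographic (tier, -idx) best-score tracking fold by a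
-- two-pass max-tier-then-first-match selection (objective: idiomatic; same return value).

-- ===== PORT A =====
-- loop body of A's for-loop: try int(item.get("status")) except → 0; tier chain; score compare/update
def pvStepA (st : Option (List (String × String)) × (Int × Int))
    (p : Int × List (String × String)) : Option (List (String × String)) × (Int × Int) :=
  let status : Int := match (PySem.Dict.mk p.2).get? "status" with
    | none => 0                          -- TypeError on int(None)
    | some s => (PySem.Int.ofStr? s).getD 0   -- ValueError → 0
  let tier : Int := if status = 200 then 3
    else if 100 ≤ status ∧ status < 400 then 2
    else if 0 < status then 1
    else 0
  -- score = (tier, -idx); tuple comparison score > best_score, lexicographic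
  if tier > st.2.1 ∨ (tier = st.2.1 ∧ -p.1 > st.2.2) then (some p.2, (tier, -p.1)) else st

def choose_http_signal (entries : Option (List (List (String × String)))) : String × String :=
  match entries with
  | none => ("", "")                     -- 'if not entries'
  | some l =>
    if l = [] then ("", "")
    else
      let r := (PySem.List.enumerate l 0).foldl pvStepA (none, (-1, 0))
      match r.1 with
      | none => ("", "")                 -- 'if not best_item' (never picked)
      | some item =>
        if item = [] then ("", "")       -- 'if not best_item' (empty dict is falsy)
        else (((PySem.Dict.mk item).get? "status").getD "",   -- str(status or ""); values are str
              ((PySem.Dict.mk item).get? "server").getD "")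

-- ===== PORT B =====
-- _tier of Source B
def pvTier (item : List (String × String)) : Int :=
  let status : Int := match (PySem.Dict.mk item).get? "status" with
    | none => 0
    | some s => (PySem.Int.ofStr? s).getD 0
  if status = 200 then 3
  else if 100 ≤ status ∧ status < 400 then 2
  else if 0 < status then 1
  else 0

def choose_http_signal_alt (entries : Option (List (List (String × String)))) : String × String :=
  match entries with
  | none => ("", "")
  | some items =>
    if items = [] then ("", "")
    else
      -- best = max(...); max() cannot raise here (items ≠ []), so getD 0 is unreachable
      let best := (PySem.List.max? (items.map pvTier) (fun y => y)).getD 0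
      -- next(i for i in items if _tier(...) == best); always found, getD [] unreachable
      let item := (items.find? (fun i => pvTier i == best)).getD []
      (((PySem.Dict.mk item).get? "status").getD "",
       ((PySem.Dict.mk item).get? "server").getD "")

-- ===== PRECONDITION & SPEC =====
def Spec_choose_http_signal (entries : Option (List (List (String × String)))) (out : String × String) : Prop := out = choose_http_signal_alt entries
instance (entries : Option (List (List (String × String)))) (out : String × String) : Decidable (Spec_choose_http_signal entries out) := by unfold Spec_choose_http_signal; infer_instance

-- ===== CLAIM (what is proved, stated in full; the proofs are below) =====
def Claim_equal_choose_http_signal : Prop := ∀ (entries : Option (List (List (String × String)))), Dom_choose_http_signal entries → Spec_choose_http_signal entries (choose_http_signal entries)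

-- ===== LEMMAS AND PROOFS =====

-- what A's fold computes, item-wise: running best, updated exactly on strictly larger tier
def pvG (t : Int) (l : List (List (String × String))) (it : List (String × String)) :
    List (String × String) :=
  match l with
  | [] => it
  | x :: xs => if pvTier x > t then pvG (pvTier x) xs x else pvG t xs it

theorem pvTier_nonneg (it : List (String × String)) : 0 ≤ pvTier it := by
  unfold pvTier
  dsimp only
  split_ifs <;> norm_num

theorem pvStepA_eq (st : Option (List (String × String)) × (Int × Int))
    (p : Int × List (String × String)) :
    pvStepA st p =
      if pvTier p.2 > st.2.1 ∨ (pvTier p.2 = st.2.1 ∧ -p.1 > st.2.2)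
      then (some p.2, (pvTier p.2, -p.1)) else st := rfl

theorem foldA (l : List (List (String × String))) :
    ∀ (s : Int) (it : List (String × String)) (t j : Int), j ≤ s →
    ((PySem.List.enumerate l s).foldl pvStepA (some it, (t, -j))).1 = some (pvG t l it) := by
  induction l with
  | nil => intro s it t j _; simp [PySem.List.enumerate_nil, pvG]
  | cons x xs ih =>
    intro s it t j hj
    rw [PySem.List.enumerate_cons, List.foldl_cons, pvStepA_eq]
    have hno : ¬ (-s > -j) := by omega
    by_cases h : pvTier x > t
    · have : (pvTier x > t ∨ (pvTier x = t ∧ -s > -j)) := Or.inl h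
      rw [if_pos this]
      rw [ih (s + 1) x (pvTier x) s (by omega)]
      conv_rhs => rw [pvG]
      rw [if_pos h]
    · have : ¬ (pvTier x > t ∨ (pvTier x = t ∧ -s > -j)) := by
        rintro (h' | ⟨_, h'⟩) <;> [exact h h'; exact hno h']
      rw [if_neg this]
      rw [ih (s + 1) it t j (by omega)]
      conv_rhs => rw [pvG]
      rw [if_neg h]

theorem foldA_entry (x : List (String × String)) (xs : List (List (String × String))) :
    ((PySem.List.enumerate (x :: xs) 0).foldl pvStepA (none, (-1, 0))).1
      = some (pvG (pvTier x) xs x) := by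
  rw [PySem.List.enumerate_cons, List.foldl_cons, pvStepA_eq]
  have h : pvTier x > (-1 : Int) := lt_of_lt_of_le (by norm_num) (pvTier_nonneg x)
  rw [if_pos (Or.inl h)]
  have := foldA xs 1 x (pvTier x) 0 (by norm_num)
  simpa using this

theorem gB (xs : List (List (String × String))) :
    ∀ it, pvG (pvTier it) xs it =
      ((it :: xs).find? (fun i => pvTier i == (xs.map pvTier).foldl max (pvTier it))).getD [] := by
  induction xs with
  | nil => intro it; simp [pvG, List.find?]
  | cons x xs ih =>
    intro it
    by_cases h : pvTier x > pvTier it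
    · have hmax : max (pvTier it) (pvTier x) = pvTier x := by omega
      have hM : pvTier x ≤ (xs.map pvTier).foldl max (pvTier x) :=
        (PySem.List.le_foldl_max (xs.map pvTier) (pvTier x)).1
      have hne : ¬ (pvTier it == (xs.map pvTier).foldl max (pvTier x)) = true := by
        simp only [beq_iff_eq]; omega
      simp only [pvG, if_pos h, List.map_cons, List.foldl_cons, hmax]
      rw [ih x]
      rw [List.find?_cons_of_neg
        (p := fun i => pvTier i == (xs.map pvTier).foldl max (pvTier x)) (a := it) hne]
    · have hle : pvTier x ≤ pvTier it := by omega
      have hmax : max (pvTier it) (pvTier x) = pvTier it := by omega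
      simp only [pvG, if_neg h, List.map_cons, List.foldl_cons, hmax]
      rw [ih it]
      set M := (xs.map pvTier).foldl max (pvTier it) with hMdef
      have hM : pvTier it ≤ M := (PySem.List.le_foldl_max (xs.map pvTier) (pvTier it)).1
      by_cases hit : pvTier it = M
      · have hpos : (pvTier it == M) = true := by simp [hit]
        rw [List.find?_cons_of_pos (p := fun i => pvTier i == M) (a := it) hpos,
          List.find?_cons_of_pos (p := fun i => pvTier i == M) (a := it) hpos]
      · have hxne : ¬ (pvTier x == M) = true := by simp only [beq_iff_eq]; omega
        have hitne : ¬ (pvTier it == M) = true := by simp only [beq_iff_eq]; exact hit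
        rw [List.find?_cons_of_neg (p := fun i => pvTier i == M) (a := it) hitne,
          List.find?_cons_of_neg (p := fun i => pvTier i == M) (a := it) hitne,
          List.find?_cons_of_neg (p := fun i => pvTier i == M) (a := x) hxne]

-- ===== VERDICT (by name: the statement is the Claim_ definition above) =====
theorem choose_http_signal_spec : Claim_equal_choose_http_signal := by
  intro entries _
  unfold Spec_choose_http_signal choose_http_signal choose_http_signal_alt
  match entries with
  | none => rfl
  | some l =>
    match l with
    | [] => rfl
    | x :: xs =>
      simp only [if_neg (List.cons_ne_nil x xs), List.map_cons]
      rw [foldA_entry x xs, gB xs x, PySem.List.max?_id_cons]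
      simp only [Option.getD_some]
      set item := (List.find? (fun i => pvTier i == (xs.map pvTier).foldl max (pvTier x))
        (x :: xs)).getD [] with hi
      by_cases hit : item = []
      · rw [hit]; decide
      · dsimp only
        rw [if_neg hit]
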